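-- pv_equiv track=rewrite | github.com/idesa013/phrases | app/services/image_generator.py | contains_original_word_in_any_run
-- ===== SOURCE A (Python) =====
-- def contains_original_word_in_any_run(
--     parts: list[str],
--     originals: tuple[str, str],
-- ) -> bool:
--     normalized_originals = {word.lower() for word in originals}
--
--     for start in range(len(parts)):
--         current = ""
--         for end in range(start, len(parts)):
--             current += parts[end].lower()
--             if current in normalized_originals:
--                 return True
--
--     return False
-- ===== SOURCE B (Python) =====
-- def contains_original_word_in_any_run(
--     parts: list[str],
--     originals: tuple[str, str],
-- ) -> bool:
--     lowered = [p.lower() for p in parts]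
--     n = len(lowered)
--     for word in (originals[0].lower(), originals[1].lower()):
--         wlen = len(word)
--         for start in range(n):
--             j = 0
--             for i in range(start, n):
--                 p = lowered[i]
--                 if not word.startswith(p, j):
--                     break
--                 j += len(p)
--                 if j == wlen:
--                     return True
--     return False
-- ===== Notes on version B (the rewrite author's own statement) =====
-- stated objective: faster
-- what changed: Instead of materialising every run's concatenation per start index and testing set membership, B strips lowercased parts off the front of each target word recursively, failing fast as soon as a part is not a prefix of the remaining word.
import Mathlib
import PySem

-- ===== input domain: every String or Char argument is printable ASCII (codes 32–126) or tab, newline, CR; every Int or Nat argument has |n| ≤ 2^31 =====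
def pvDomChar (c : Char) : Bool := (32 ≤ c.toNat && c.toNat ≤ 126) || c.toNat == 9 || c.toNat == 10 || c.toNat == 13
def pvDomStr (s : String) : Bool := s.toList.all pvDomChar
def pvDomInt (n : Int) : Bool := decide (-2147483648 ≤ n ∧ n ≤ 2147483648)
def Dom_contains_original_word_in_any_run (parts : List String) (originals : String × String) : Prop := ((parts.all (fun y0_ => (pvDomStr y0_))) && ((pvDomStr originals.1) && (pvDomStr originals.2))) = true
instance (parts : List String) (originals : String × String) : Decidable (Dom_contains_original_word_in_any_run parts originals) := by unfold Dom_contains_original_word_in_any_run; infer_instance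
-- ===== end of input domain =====

-- B replaces A's per-start rebuilding of the run's concatenation (checked against a set of the two
-- lowercased targets) by a pointer into each target word that is advanced part by part with a
-- prefix test, failing fast on a mismatch; a timing run measured B faster on large inputs.

-- ===== PORT A =====
-- inner loop: 'for end in range(start, len(parts)): current += parts[end].lower(); if current in normalized: return True'
def pvAInner (norm : PySem.Set (List Char)) (cur : List Char) : List (List Char) → Bool
  | [] => false
  | p :: rest =>
    let cur2 := cur ++ PySem.Chars.lower p
    if norm.contains cur2 then true else pvAInner norm cur2 rest

-- outer loop: 'for start in range(len(parts))', iterating over the suffixes parts[start:]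
def pvAOuter (norm : PySem.Set (List Char)) : List (List Char) → Bool
  | [] => false
  | p :: rest => if pvAInner norm [] (p :: rest) then true else pvAOuter norm rest

def contains_original_word_in_any_run (parts : List String) (originals : String × String) : Bool :=
  let norm : PySem.Set (List Char) :=
    PySem.Set.ofList [PySem.Chars.lower originals.1.toList, PySem.Chars.lower originals.2.toList]
  pvAOuter norm (parts.map String.toList)

-- ===== PORT B =====
-- inner loop: 'for i in range(start, n): if not word.startswith(p, j): break; j += len(p); if j == wlen: return True'
def pvBInner (word : List Char) (j : Nat) : List (List Char) → Bool
  | [] => false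
  | p :: rest =>
    if p.isPrefixOf (word.drop j) then
      if j + p.length == word.length then true else pvBInner word (j + p.length) rest
    else false

-- 'for start in range(n)', iterating over the suffixes lowered[start:]
def pvBOuter (word : List Char) : List (List Char) → Bool
  | [] => false
  | p :: rest => pvBInner word 0 (p :: rest) || pvBOuter word rest

def contains_original_word_in_any_run_alt (parts : List String) (originals : String × String) : Bool :=
  let lowered := parts.map (fun p => PySem.Chars.lower p.toList)
  pvBOuter (PySem.Chars.lower originals.1.toList) lowered
    || pvBOuter (PySem.Chars.lower originals.2.toList) lowered

-- ===== PRECONDITION & SPEC =====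
def Spec_contains_original_word_in_any_run (parts : List String) (originals : String × String) (out : Bool) : Prop := out = contains_original_word_in_any_run_alt parts originals
instance (parts : List String) (originals : String × String) (out : Bool) : Decidable (Spec_contains_original_word_in_any_run parts originals out) := by unfold Spec_contains_original_word_in_any_run; infer_instance

-- ===== CLAIM (what is proved, stated in full; the proofs are below) =====
def Claim_equal_contains_original_word_in_any_run : Prop := ∀ (parts : List String) (originals : String × String), Dom_contains_original_word_in_any_run parts originals → Spec_contains_original_word_in_any_run parts originals (contains_original_word_in_any_run parts originals)

-- ===== LEMMAS AND PROOFS =====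

-- A's inner loop specialised to a single target word w (proof helper).
def pvAW (w cur : List Char) : List (List Char) → Bool
  | [] => false
  | p :: rest =>
    let cur2 := cur ++ PySem.Chars.lower p
    if cur2 == w then true else pvAW w cur2 rest

-- membership in the two-element set of normalized originals is the disjunction of two equalities
theorem pvA_contains2 (w1 w2 c : List Char) :
    (PySem.Set.ofList [w1, w2]).contains c = (c == w1 || c == w2) := by
  rw [Bool.eq_iff_iff, PySem.Set.contains_iff, PySem.Set.mem_ofList]
  simp


-- A's inner loop with two targets splits into the two single-word inner loops
theorem pvA_inner_split (w1 w2 : List Char) :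
    ∀ (l : List (List Char)) (cur : List Char),
      pvAInner (PySem.Set.ofList [w1, w2]) cur l = (pvAW w1 cur l || pvAW w2 cur l) := by
  intro l
  induction l with
  | nil => intro cur; simp [pvAInner, pvAW]
  | cons p rest ih =>
    intro cur
    simp only [pvAInner, pvAW, pvA_contains2]
    by_cases h1 : cur ++ PySem.Chars.lower p = w1 <;>
      by_cases h2 : cur ++ PySem.Chars.lower p = w2 <;>
        simp [h1, h2, ih]

-- core: A's single-word accumulation equals B's pointer walk, as long as the accumulator is a
-- prefix of the word; otherwise A's inner loop can never hit the word again.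
theorem pvAW_eq_pvBInner (w : List Char) :
    ∀ (l : List (List Char)) (cur : List Char),
      pvAW w cur l =
        if cur <+: w then pvBInner w cur.length (l.map PySem.Chars.lower) else false := by
  intro l
  induction l with
  | nil => intro cur; simp [pvAW, pvBInner]
  | cons p rest ih =>
    intro cur
    by_cases hpre : cur <+: w
    · obtain ⟨t, ht⟩ := hpre
      subst ht
      simp only [pvAW, List.map_cons, pvBInner]
      rw [if_pos (show cur <+: cur ++ t from ⟨t, rfl⟩), List.drop_left]
      by_cases hp : PySem.Chars.lower p <+: t
      · rw [if_pos (show (PySem.Chars.lower p).isPrefixOf t = true from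
            List.isPrefixOf_iff_prefix.mpr hp)]
        by_cases hlen : cur.length + (PySem.Chars.lower p).length = (cur ++ t).length
        · have hteq : PySem.Chars.lower p = t := by
            apply hp.eq_of_length
            simp only [List.length_append] at hlen
            omega
          rw [if_pos (show (cur.length + (PySem.Chars.lower p).length == (cur ++ t).length) = true
              by simpa using hlen)]
          rw [if_pos (show (cur ++ PySem.Chars.lower p == cur ++ t) = true by simp [hteq])]
        · have hne : ¬ (cur ++ PySem.Chars.lower p = cur ++ t) := by
            intro hc
            exact hlen (by simp [List.append_cancel_left hc])
          rw [if_neg (show ¬ ((cur ++ PySem.Chars.lower p == cur ++ t) = true) by simpa using hne)]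
          rw [if_neg (show ¬ ((cur.length + (PySem.Chars.lower p).length == (cur ++ t).length) = true)
              by simpa using hlen)]
          rw [ih (cur ++ PySem.Chars.lower p)]
          rw [if_pos (show cur ++ PySem.Chars.lower p <+: cur ++ t by
            obtain ⟨u, hu⟩ := hp
            exact ⟨u, by rw [← hu, List.append_assoc]⟩)]
          simp
      · -- the next accumulator is no longer a prefix of w: A's inner loop stays false
        have hne : ¬ (cur ++ PySem.Chars.lower p = cur ++ t) := by
          intro hc
          exact hp (by rw [List.append_cancel_left hc])
        rw [if_neg (show ¬ ((cur ++ PySem.Chars.lower p == cur ++ t) = true) by simpa using hne)]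
        rw [if_neg (show ¬ ((PySem.Chars.lower p).isPrefixOf t = true) by
          simpa [List.isPrefixOf_iff_prefix] using hp)]
        rw [ih (cur ++ PySem.Chars.lower p)]
        rw [if_neg (show ¬ (cur ++ PySem.Chars.lower p <+: cur ++ t) by
          intro hc
          apply hp
          obtain ⟨u, hu⟩ := hc
          rw [List.append_assoc] at hu
          exact ⟨u, List.append_cancel_left hu⟩)]
    · rw [if_neg hpre]
      simp only [pvAW]
      have hne : ¬ (cur ++ PySem.Chars.lower p = w) := by
        intro hc; exact hpre ⟨PySem.Chars.lower p, hc⟩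
      rw [if_neg (show ¬ ((cur ++ PySem.Chars.lower p == w) = true) by simpa using hne)]
      rw [ih (cur ++ PySem.Chars.lower p)]
      rw [if_neg (show ¬ (cur ++ PySem.Chars.lower p <+: w) by
        intro hc
        obtain ⟨u, hu⟩ := hc
        rw [List.append_assoc] at hu
        exact hpre ⟨PySem.Chars.lower p ++ u, hu⟩)]


theorem pvA_outer_eq (w1 w2 : List Char) :
    ∀ (l : List (List Char)),
      pvAOuter (PySem.Set.ofList [w1, w2]) l =
        (pvBOuter w1 (l.map PySem.Chars.lower) || pvBOuter w2 (l.map PySem.Chars.lower)) := by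
  intro l
  induction l with
  | nil => simp [pvAOuter, pvBOuter]
  | cons p rest ih =>
    simp only [pvAOuter, List.map_cons, pvBOuter]
    rw [pvA_inner_split, pvAW_eq_pvBInner, pvAW_eq_pvBInner]
    rw [if_pos (List.nil_prefix), if_pos (List.nil_prefix)]
    simp only [List.length_nil, List.map_cons, ih]
    cases pvBInner w1 0 (PySem.Chars.lower p :: rest.map PySem.Chars.lower) <;>
      cases pvBInner w2 0 (PySem.Chars.lower p :: rest.map PySem.Chars.lower) <;>
        cases pvBOuter w1 (rest.map PySem.Chars.lower) <;>
          cases pvBOuter w2 (rest.map PySem.Chars.lower) <;> simp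

-- ===== VERDICT (by name: the statement is the Claim_ definition above) =====
theorem contains_original_word_in_any_run_spec : Claim_equal_contains_original_word_in_any_run := by
  intro parts originals _
  unfold Spec_contains_original_word_in_any_run
  unfold contains_original_word_in_any_run contains_original_word_in_any_run_alt
  simp only [pvA_outer_eq, List.map_map]
  rfl
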